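-- pv_equiv track=rewrite | github.com/liza-panineyeva/Pandas | task2.py | all_substr
-- ===== SOURCE A (Python) =====
-- def all_substr(string):
--     for i in range(len(string)):
--
--         if i == len(string)-1:
--             yield string
--
--         first_part = string[0:i+1]
--         second_part = string[i+1:]
--
--         for j in all_substr(second_part):
--             yield ','.join([first_part, j])
-- ===== SOURCE B (Python) =====
-- def all_substr(string):
--     # Iterative DP over suffixes (dp[j] = partitions of string[k+j:]) instead of A's naive recursive generator.
--     n = len(string)
--     dp = [[]]
--     for k in reversed(range(n)):
--         cur = []
--         for i in range(k, n):
--             if i == n - 1: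
--                 cur.append(string[k:])
--             cur += [string[k:i+1] + "," + j for j in dp[i - k]]
--         dp = [cur] + dp
--     yield from dp[0]
-- ===== Notes on version B (the rewrite author's own statement) =====
-- stated objective: alternative
-- what changed: Replaces A's naive recursive generator (which re-enumerates each suffix's partitions through nested generator chains) by a bottom-up dynamic-programming table over suffixes, computing each suffix's partition list exactly once.
import Mathlib
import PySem

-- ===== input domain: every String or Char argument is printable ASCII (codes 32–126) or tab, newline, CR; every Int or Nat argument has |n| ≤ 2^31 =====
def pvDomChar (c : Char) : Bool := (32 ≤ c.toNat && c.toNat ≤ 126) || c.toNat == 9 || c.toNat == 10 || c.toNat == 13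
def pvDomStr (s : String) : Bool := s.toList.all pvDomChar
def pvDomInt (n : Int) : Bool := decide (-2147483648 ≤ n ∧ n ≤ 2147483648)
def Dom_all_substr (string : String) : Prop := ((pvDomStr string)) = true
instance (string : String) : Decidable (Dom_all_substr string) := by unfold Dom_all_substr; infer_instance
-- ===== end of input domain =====

-- B replaces A's naive recursive generator by a bottom-up DP table over suffixes, so each
-- suffix's partition list is built once (an alternative, iterative decomposition).


-- ===== PORT A =====
-- A's generator, as a function returning the list of yields in order.  The outer
-- `for i in range(len(string))` loop is the recursion on `i`; the recursive call on
-- `second_part = string[i+1:]` is `allAaux (s.drop (i+1)) 0`.  Slices string[0:i+1] /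
-- string[i+1:] are exact as take/drop here (indices are nonnegative and in range), and
-- ','.join([first_part, j]) is first_part ++ "," ++ j.
def allAaux (s : List Char) (i : Nat) : List String :=
  if h : i < s.length then
    (if i = s.length - 1 then [String.mk s] else []) ++
    ((allAaux (s.drop (i+1)) 0).map (fun j => String.mk (s.take (i+1)) ++ "," ++ j)) ++
    allAaux s (i+1)
  else []
termination_by (s.length, s.length - i)
decreasing_by
  · exact Prod.Lex.left _ _ (by simp [List.length_drop]; omega)
  · exact Prod.Lex.right _ (by omega)

def all_substr (string : String) : List String := allAaux string.toList 0

-- ===== PORT B =====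
-- B's inner loop `for i in range(k, n)` over the current suffix, reading dp[i-k]
-- (partitions of string[i+1:]).  Slices string[k:] / string[k:i+1] are exact as
-- drop/take (indices nonnegative, k ≤ n).
def stepB (cs : List Char) (n k : Nat) (dp : List (List String)) : List String :=
  (List.range' k (n - k)).foldl (fun cur i =>
    (if i = n - 1 then cur ++ [String.mk (cs.drop k)] else cur) ++
    (dp.getD (i - k) []).map (fun j => String.mk ((cs.drop k).take (i + 1 - k)) ++ "," ++ j)) []

-- B's outer loop `for k in reversed(range(n))`, prepending the new row; dp starts as [[]]
-- (the empty suffix has no partitions) and dp[0] at the end is the answer.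
def all_substr_alt (string : String) : List String :=
  let cs := string.toList
  let n := cs.length
  let dp := (List.range n).reverse.foldl (fun dp k => stepB cs n k dp :: dp) [[]]
  dp.headD []

-- ===== PRECONDITION & SPEC =====
def Spec_all_substr (string : String) (out : List String) : Prop := out = all_substr_alt string
instance (string : String) (out : List String) : Decidable (Spec_all_substr string out) := by unfold Spec_all_substr; infer_instance

-- ===== CLAIM (what is proved, stated in full; the proofs are below) =====
def Claim_equal_all_substr : Prop := ∀ (string : String), Dom_all_substr string → Spec_all_substr string (all_substr string)

-- ===== LEMMAS AND PROOFS =====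

-- allAaux is empty once i reaches the length
theorem allAaux_of_ge (s : List Char) (i : Nat) (h : s.length ≤ i) : allAaux s i = [] := by
  rw [allAaux]; simp [Nat.not_lt_of_ge h]

-- stepB's fold, started from i with accumulator cur, appends exactly the remaining
-- iterations of A's loop on the suffix cs.drop m, provided dp holds the suffix results.
theorem stepB_fold_eq (cs : List Char) (m i : Nat) (cur : List String)
    (hm : m ≤ i) :
    (List.range' i (cs.length - i)).foldl (fun cur i =>
      (if i = cs.length - 1 then cur ++ [String.mk (cs.drop m)] else cur) ++
      (((List.range' (m+1) (cs.length - m)).map (fun p => allAaux (cs.drop p) 0)).getD (i - m) []).map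
        (fun j => String.mk ((cs.drop m).take (i + 1 - m)) ++ "," ++ j)) cur
    = cur ++ allAaux (cs.drop m) (i - m) := by
  by_cases hI : i < cs.length
  · -- one more loop iteration; peel it and use the induction hypothesis at i+1
    have hd : cs.length - i = (cs.length - (i+1)) + 1 := by omega
    rw [hd, List.range'_succ, List.foldl_cons,
        stepB_fold_eq cs m (i+1) _ (by omega)]
    conv_rhs => rw [allAaux]
    have hlt : i - m < (cs.drop m).length := by simp [List.length_drop]; omega
    rw [dif_pos hlt]
    have hget : ((List.range' (m+1) (cs.length - m)).map
        (fun p => allAaux (cs.drop p) 0)).getD (i - m) [] = allAaux (cs.drop (i+1)) 0 := by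
      have hj : i - m < cs.length - m := by omega
      have hix : m + 1 + (i - m) = i + 1 := by omega
      simp [List.getD_eq_getElem?_getD, hj, hix]
    have hdd : (cs.drop m).drop (i - m + 1) = cs.drop (i+1) := by
      rw [List.drop_drop]; congr 1; omega
    have htk : i + 1 - m = i - m + 1 := by omega
    rw [hget, hdd, htk]
    by_cases hlast : i = cs.length - 1
    · simp [hlast, show cs.length - 1 - m = cs.length - m - 1 from by omega,
            List.append_assoc]
    · simp [hlast, show ¬ i - m = cs.length - m - 1 from by omega, List.append_assoc]
  · -- loop finished: both sides are just cur
    have h0 : cs.length - i = 0 := by omega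
    rw [h0, allAaux_of_ge _ _ (by simp [List.length_drop]; omega)]
    simp

theorem stepB_eq (cs : List Char) (m : Nat) (hm : m ≤ cs.length) :
    stepB cs cs.length m ((List.range' (m+1) (cs.length - m)).map (fun p => allAaux (cs.drop p) 0))
      = allAaux (cs.drop m) 0 := by
  have := stepB_fold_eq cs m m [] (le_refl m)
  simpa [stepB] using this

-- the outer fold builds the table of suffix results
theorem dp_fold_eq (cs : List Char) (m : Nat) (hm : m ≤ cs.length) :
    (List.range' m (cs.length - m)).reverse.foldl (fun dp k => stepB cs cs.length k dp :: dp) [[]]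
      = (List.range' m (cs.length - m + 1)).map (fun p => allAaux (cs.drop p) 0) := by
  by_cases hI : m < cs.length
  · have hd : cs.length - m = (cs.length - (m+1)) + 1 := by omega
    rw [hd, List.range'_succ, List.reverse_cons, List.foldl_append,
        dp_fold_eq cs (m+1) (by omega)]
    have h1 : cs.length - (m+1) + 1 = cs.length - m := by omega
    rw [h1, List.foldl_cons, List.foldl_nil, stepB_eq cs m (by omega)]
    rw [show cs.length - m + 1 = (cs.length - (m+1) + 1) + 1 by omega, List.range'_succ]
    simp [h1]
  · have hm' : m = cs.length := by omega
    subst hm'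
    simp [allAaux_of_ge]

-- ===== VERDICT (by name: the statement is the Claim_ definition above) =====
theorem all_substr_spec : Claim_equal_all_substr := by
  intro s _
  unfold Spec_all_substr all_substr all_substr_alt
  have h := dp_fold_eq s.toList 0 (Nat.zero_le _)
  simp only [Nat.sub_zero] at h
  show allAaux s.toList 0 =
    ((List.range s.toList.length).reverse.foldl
      (fun dp k => stepB s.toList s.toList.length k dp :: dp) [[]]).headD []
  rw [List.range_eq_range', h, List.range'_succ]
  simp
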